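-- pv_equiv track=rewrite | github.com/adasey/coding | Programmers/Hash/bestAlbume.py | bigValueIndex
-- ===== SOURCE A (Python) =====
-- def bigValueIndex(play, temp):
--     try:
--         temp.extend(play.pop(max(play))[:2])
--
--     except:
--         return temp
--
--     if len(temp) >= 2:
--         return temp
--
--     else:
--         return bigValueIndex(play, temp)
-- ===== SOURCE B (Python) =====
-- def bigValueIndex(play, temp):
--     for key in sorted(play, reverse=True):
--         temp.extend(play.pop(key)[:2])
--         if len(temp) >= 2:
--             return temp
--     return temp
-- ===== Notes on version B (the rewrite author's own statement) =====
-- stated objective: simpler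
-- what changed: Replaces A's recursion that re-scans the dict with max() and pops inside a try/except by a single descending sort of the keys followed by one early-exit loop.
import Mathlib
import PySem

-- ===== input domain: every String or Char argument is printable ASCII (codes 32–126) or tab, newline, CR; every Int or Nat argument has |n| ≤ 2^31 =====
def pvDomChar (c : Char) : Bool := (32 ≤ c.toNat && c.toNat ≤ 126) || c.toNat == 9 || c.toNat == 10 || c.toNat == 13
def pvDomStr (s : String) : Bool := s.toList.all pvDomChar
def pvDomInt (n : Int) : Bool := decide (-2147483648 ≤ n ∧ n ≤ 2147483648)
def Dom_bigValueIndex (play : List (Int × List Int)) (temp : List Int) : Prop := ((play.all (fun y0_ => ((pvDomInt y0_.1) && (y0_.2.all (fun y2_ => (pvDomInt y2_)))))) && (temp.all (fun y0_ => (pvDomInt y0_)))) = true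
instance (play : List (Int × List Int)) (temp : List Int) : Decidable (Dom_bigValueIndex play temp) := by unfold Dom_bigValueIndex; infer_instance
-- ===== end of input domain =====

-- B replaces A's max-and-pop recursion (with its try/except) by one descending sort of the keys
-- followed by a single loop; same return value, and both Pythons mutate `play`/`temp` identically.

-- ===== PORT A =====
-- termination helper for A's pop loop: popping the max key shrinks the dict
theorem pv_erase_size_lt (d : PySem.Dict Int (List Int)) (k : Int)
    (h : k ∈ d.keys) : (d.erase k).size < d.size := by
  have : ∃ p ∈ d.items, ¬ ((!p.1 == k) = true) := by
    rcases List.mem_map.mp h with ⟨p, hp, hk⟩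
    exact ⟨p, hp, by simp [hk]⟩
  simpa [PySem.Dict.erase, PySem.Dict.size] using List.length_filter_lt_length_iff_exists.mpr this

-- try: temp.extend(play.pop(max(play))[:2]) except: return temp; then len-check, else recurse
def bigValueIndexGo (d : PySem.Dict Int (List Int)) (temp : List Int) : List Int :=
  match h : PySem.List.max? d.keys (fun k => k) with
  | none => temp                                   -- max(play) raised: bare except returns temp
  | some m =>
      let v := d.getD m []                         -- play.pop(m): value …
      let d' := d.erase m                          -- … and removal
      let temp' := temp ++ PySem.List.slice v none (some 2)   -- temp.extend(v[:2])
      if temp'.length ≥ 2 then temp' else bigValueIndexGo d' temp'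
termination_by d.size
decreasing_by exact pv_erase_size_lt d m (PySem.List.max?_mem h)

def bigValueIndex (play : List (Int × List Int)) (temp : List Int) : List Int :=
  bigValueIndexGo (PySem.Dict.ofList play) temp

-- ===== PORT B =====
-- for key in sorted(play, reverse=True): temp.extend(play.pop(key)[:2]); if len(temp) >= 2: return temp
def bigValueIndexAltGo (d : PySem.Dict Int (List Int)) (keys : List Int) (temp : List Int) : List Int :=
  match keys with
  | [] => temp
  | k :: ks =>
      let v := d.getD k []
      let d' := d.erase k
      let temp' := temp ++ PySem.List.slice v none (some 2)
      if temp'.length ≥ 2 then temp' else bigValueIndexAltGo d' ks temp'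

def bigValueIndex_alt (play : List (Int × List Int)) (temp : List Int) : List Int :=
  let d := PySem.Dict.ofList play
  bigValueIndexAltGo d (PySem.List.sorted d.keys (fun k => k) true) temp

-- ===== PRECONDITION & SPEC =====
def Spec_bigValueIndex (play : List (Int × List Int)) (temp : List Int) (out : List Int) : Prop := out = bigValueIndex_alt play temp
instance (play : List (Int × List Int)) (temp : List Int) (out : List Int) : Decidable (Spec_bigValueIndex play temp out) := by unfold Spec_bigValueIndex; infer_instance

-- ===== CLAIM (what is proved, stated in full; the proofs are below) =====
def Claim_equal_bigValueIndex : Prop := ∀ (play : List (Int × List Int)) (temp : List Int), Dom_bigValueIndex play temp → Spec_bigValueIndex play temp (bigValueIndex play temp)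

-- ===== LEMMAS AND PROOFS =====

theorem pv_keys_erase (d : PySem.Dict Int (List Int)) (k : Int) :
    (d.erase k).keys = d.keys.filter (fun x => !(x == k)) := by
  simp [PySem.Dict.erase, PySem.Dict.keys, List.filter_map, Function.comp_def]

-- descending sort of a nodup list peels off its maximum
theorem pv_sorted_rev_cons_max (xs : List Int) (m : Int)
    (hnd : xs.Nodup) (hm : PySem.List.max? xs (fun k => k) = some m) :
    PySem.List.sorted xs (fun k => k) true
      = m :: PySem.List.sorted (xs.filter (fun x => !(x == m))) (fun k => k) true := by
  set t := PySem.List.sorted (xs.filter (fun x => !(x == m))) (fun k => k) true with ht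
  have hperm : t.Perm (xs.filter (fun x => !(x == m))) := PySem.List.sorted_perm _ _ _
  have hmem : m ∈ xs := PySem.List.max?_mem hm
  have hfe : xs.filter (fun x => !(x == m)) = xs.erase m := by
    rw [List.Nodup.erase_eq_filter hnd]
    simp [bne]
  have hpxs : (m :: t).Perm xs := by
    refine List.Perm.trans (List.Perm.cons m (hperm.trans ?_)) (List.perm_cons_erase hmem).symm
    rw [hfe]
  refine PySem.List.sorted_rev_eq_of_perm_of_pairwise_gt xs (m :: t) (fun k => k) hpxs ?_
  constructor
  · intro y hy
    have hy' : y ∈ xs.filter (fun x => !(x == m)) := hperm.mem_iff.mp hy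
    have hne := List.of_mem_filter hy'
    have hyx : y ∈ xs := List.mem_of_mem_filter hy'
    have hle : y ≤ m := PySem.List.max?_isMax hm y hyx
    simp only [Bool.not_eq_true', beq_eq_false_iff_ne, ne_eq] at hne
    exact lt_of_le_of_ne hle hne
  · have hge : List.Pairwise (fun a b : Int => b ≤ a) t := PySem.List.sorted_pairwise_rev _ _
    have hnd' : t.Nodup := hperm.nodup_iff.mpr (hnd.filter _)
    exact (List.Pairwise.and hnd' hge).imp (fun h => lt_of_le_of_ne h.2 (Ne.symm h.1))

theorem pv_go_eq (n : Nat) : ∀ (d : PySem.Dict Int (List Int)) (temp : List Int),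
    d.size = n → d.keys.Nodup →
    bigValueIndexGo d temp = bigValueIndexAltGo d (PySem.List.sorted d.keys (fun k => k) true) temp := by
  induction n using Nat.strong_induction_on with
  | _ n ih =>
    intro d temp hsz hnd
    rw [bigValueIndexGo]
    split
    · rename_i heq
      have hk : d.keys = [] := (PySem.List.max?_eq_none_iff _ _).mp heq
      rw [hk, show PySem.List.sorted ([] : List Int) (fun k => k) true = [] from
        (PySem.List.sorted_eq_nil_iff _ _ _).mpr rfl]
      rfl
    · rename_i m heq
      rw [pv_sorted_rev_cons_max d.keys m hnd heq]
      show _ = bigValueIndexAltGo d (m :: _) temp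
      rw [bigValueIndexAltGo]
      simp only []
      split
      · rfl
      · rw [← pv_keys_erase]
        exact ih (d.erase m).size (hsz ▸ pv_erase_size_lt d m (PySem.List.max?_mem heq))
          (d.erase m) _ rfl (by rw [pv_keys_erase]; exact hnd.filter _)

theorem bigValueIndex_spec : Claim_equal_bigValueIndex := by
  intro play temp _
  unfold Spec_bigValueIndex bigValueIndex bigValueIndex_alt
  exact pv_go_eq _ (PySem.Dict.ofList play) temp rfl (PySem.Dict.nodup_keys_ofList play)
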